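-- pv_equiv track=rewrite | github.com/admiralbolt/algorithms | hackerrank/general/insertion_sort_analysis/tree_optimized.py | only
-- ===== SOURCE A (Python) =====
-- def only(l):
--   only_decreasing = True
--   only_increasing = True
--   for i in range(len(l) - 1):
--     if l[i + 1] < l[i]:
--       only_increasing = False
--     elif l[i + 1] > l[i]:
--       only_decreasing = False
--   return only_decreasing, only_increasing
-- ===== SOURCE B (Python) =====
-- def only(l):
--   inc = sorted(l)
--   dec = sorted(l, reverse=True)
--   return l == dec, l == inc
-- ===== Notes on version B (the rewrite author's own statement) =====
-- stated objective: alternative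
-- what changed: Replaces the flag-maintaining adjacent-pair loop with a sort-and-compare check: the list is non-decreasing iff it equals its stable sort, non-increasing iff it equals its stable reverse sort.
import Mathlib
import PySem

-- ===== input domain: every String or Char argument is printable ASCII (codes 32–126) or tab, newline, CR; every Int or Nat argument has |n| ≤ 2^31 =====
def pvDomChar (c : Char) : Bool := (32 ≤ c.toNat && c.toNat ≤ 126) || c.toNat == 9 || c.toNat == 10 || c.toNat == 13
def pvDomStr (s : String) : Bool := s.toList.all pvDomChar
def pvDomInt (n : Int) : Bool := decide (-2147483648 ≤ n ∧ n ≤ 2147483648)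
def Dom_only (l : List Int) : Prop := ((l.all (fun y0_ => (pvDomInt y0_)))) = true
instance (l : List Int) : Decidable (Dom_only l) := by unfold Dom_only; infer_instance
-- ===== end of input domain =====

-- B replaces A's flag-maintaining adjacent-pair loop with sort-and-compare: l is
-- non-decreasing iff l == sorted(l), non-increasing iff l == sorted(l, reverse=True).

-- ===== PORT A =====
-- literal port of A: loop over range(len(l)-1), indexing l[i] and l[i+1] (always in range)
def only (l : List Int) : Bool × Bool :=
  (PySem.List.pyRange 0 ((l.length : Int) - 1) 1).foldl
    (fun (s : Bool × Bool) i =>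
      let a := PySem.List.pyGetD l i 0
      let b := PySem.List.pyGetD l (i + 1) 0
      if b < a then (s.1, false)
      else if b > a then (false, s.2)
      else s)
    (true, true)

-- ===== PORT B =====
def only_alt (l : List Int) : Bool × Bool :=
  let inc := PySem.List.sorted l (fun x => x) false
  let dec := PySem.List.sorted l (fun x => x) true
  (decide (l = dec), decide (l = inc))

-- ===== PRECONDITION & SPEC =====
def Spec_only (l : List Int) (out : Bool × Bool) : Prop := out = only_alt l
instance (l : List Int) (out : Bool × Bool) : Decidable (Spec_only l out) := by unfold Spec_only; infer_instance

-- ===== CLAIM (what is proved, stated in full; the proofs are below) =====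
def Claim_equal_only : Prop := ∀ (l : List Int), Dom_only l → Spec_only l (only l)

-- ===== LEMMAS AND PROOFS =====

-- A's loop body, as a function of the adjacent pair
def stepA (s : Bool × Bool) (p : Int × Int) : Bool × Bool :=
  if p.2 < p.1 then (s.1, false)
  else if p.2 > p.1 then (false, s.2)
  else s

-- shift lemma: dropping the head of the list shifts the index range down by one
lemma shiftA (x : Int) (l : List Int) (m : Int) (s : Bool × Bool) :
    (PySem.List.pyRange 1 (m + 1) 1).foldl
      (fun s i => stepA s (PySem.List.pyGetD (x :: l) i 0, PySem.List.pyGetD (x :: l) (i + 1) 0)) s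
    = (PySem.List.pyRange 0 m 1).foldl
      (fun s i => stepA s (PySem.List.pyGetD l i 0, PySem.List.pyGetD l (i + 1) 0)) s := by
  rw [PySem.List.pyRange_one, PySem.List.pyRange_one,
      show m + 1 - 1 = m - 0 from by ring]
  simp only [List.foldl_map]
  congr 1
  funext s k
  have h1 : (1 : Int) + (k : Int) = ((k + 1 : Nat) : Int) := by omega
  have h2 : (1 : Int) + (k : Int) + 1 = ((k + 2 : Nat) : Int) := by omega
  have h3 : (0 : Int) + (k : Int) = ((k : Nat) : Int) := by omega
  have h4 : (0 : Int) + (k : Int) + 1 = ((k + 1 : Nat) : Int) := by omega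
  rw [h2, h1, h4, h3, PySem.List.pyGetD_natCast, PySem.List.pyGetD_natCast,
      PySem.List.pyGetD_natCast, PySem.List.pyGetD_natCast]
  simp [List.getD]

-- A's index loop equals a fold of stepA over the adjacent pairs
lemma foldA_eq_pairs : ∀ (l : List Int) (s : Bool × Bool),
    (PySem.List.pyRange 0 ((l.length : Int) - 1) 1).foldl
      (fun s i => stepA s (PySem.List.pyGetD l i 0, PySem.List.pyGetD l (i + 1) 0)) s
    = (l.zip l.tail).foldl stepA s := by
  intro l
  induction l with
  | nil => intro s; simp [PySem.List.pyRange_one_eq_nil]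
  | cons x t ih =>
    intro s
    cases t with
    | nil => simp [PySem.List.pyRange_one_eq_nil]
    | cons y r =>
      have hb : ((x :: y :: r).length : Int) - 1 = ((r.length : Int) + 1) + 1 - 1 := by
        simp
      rw [hb]
      have hlt : (0 : Int) < ((r.length : Int) + 1) + 1 - 1 := by omega
      rw [PySem.List.pyRange_one_cons hlt]
      simp only [List.foldl_cons]
      have hrange : ((r.length : Int) + 1) + 1 - 1 = ((r.length : Int) + 1 - 1) + 1 := by ring
      rw [hrange]
      simp only [zero_add]
      rw [shiftA]
      have hb2 : ((r.length : Int) + 1 - 1) = (((y :: r).length : Int) - 1) := by simp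
      have hzip : (x :: y :: r).zip (x :: y :: r).tail
          = (x, y) :: ((y :: r).zip (y :: r).tail) := by simp
      rw [hb2, hzip, List.foldl_cons]
      have hinit : stepA s (PySem.List.pyGetD (x :: y :: r) 0 0, PySem.List.pyGetD (x :: y :: r) 1 0)
          = stepA s (x, y) := by
        rw [show (1 : Int) = ((1 : Nat) : Int) from by norm_num,
            show (0 : Int) = ((0 : Nat) : Int) from by norm_num,
            PySem.List.pyGetD_natCast, PySem.List.pyGetD_natCast]
        simp [List.getD]
      rw [hinit, ih]

-- a fold of stepA computes the two && -accumulated flags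
lemma foldl_stepA : ∀ (ps : List (Int × Int)) (dec inc : Bool),
    ps.foldl stepA (dec, inc)
    = (dec && ps.all (fun p => !(decide (p.2 > p.1))), inc && ps.all (fun p => !(decide (p.2 < p.1)))) := by
  intro ps
  induction ps with
  | nil => intro dec inc; simp
  | cons p t ih =>
    intro dec inc
    simp only [List.foldl_cons, List.all_cons, stepA]
    by_cases h1 : p.2 < p.1
    · rw [if_pos h1, ih]
      have hgt : ¬ p.2 > p.1 := by omega
      simp [h1, hgt]
    · rw [if_neg h1]
      by_cases h2 : p.2 > p.1
      · rw [if_pos h2, ih]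
        simp [h1, h2]
      · rw [if_neg h2, ih]
        simp [h1, h2]

-- all over adjacent pairs ↔ IsChain
lemma all_zip_tail_chain (R : Int → Int → Prop) [DecidableRel R] :
    ∀ (l : List Int),
    ((l.zip l.tail).all (fun p => decide (R p.1 p.2)) = true) ↔ l.IsChain R := by
  intro l
  induction l with
  | nil => simp
  | cons x t ih =>
    cases t with
    | nil => simp
    | cons y r =>
      simp only [List.tail_cons, List.zip_cons_cons, List.all_cons, Bool.and_eq_true,
        decide_eq_true_eq, List.isChain_cons_cons]
      exact and_congr Iff.rfl ih

-- non-decreasing ↔ l equals its stable sort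
lemma pairs_all_le_iff_sorted_eq (l : List Int) :
    ((l.zip l.tail).all (fun p => !(decide (p.2 < p.1))) = true)
      ↔ l = PySem.List.sorted l (fun x => x) false := by
  have hconv : (fun p : Int × Int => !(decide (p.2 < p.1))) = fun p => decide (p.1 ≤ p.2) := by
    funext p; by_cases h : p.2 < p.1 <;> simp [h, le_of_not_gt, not_le_of_gt]
  rw [hconv, all_zip_tail_chain (· ≤ ·) l, List.isChain_iff_pairwise]
  constructor
  · intro h
    exact (PySem.List.sorted_eq_self_of_pairwise l (fun x => x) h).symm
  · intro h
    have := PySem.List.sorted_pairwise (xs := l) (key := fun x => x)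
    rwa [← h] at this

-- non-increasing ↔ l equals its stable reverse sort
lemma pairs_all_ge_iff_sorted_rev_eq (l : List Int) :
    ((l.zip l.tail).all (fun p => !(decide (p.2 > p.1))) = true)
      ↔ l = PySem.List.sorted l (fun x => x) true := by
  have hconv : (fun p : Int × Int => !(decide (p.2 > p.1))) = fun p => decide (p.2 ≤ p.1) := by
    funext p; by_cases h : p.2 > p.1 <;> simp [h, le_of_not_gt, not_le_of_gt]
  rw [hconv, all_zip_tail_chain (fun a b => b ≤ a) l, List.isChain_iff_pairwise]
  constructor
  · intro h
    exact (PySem.List.sorted_rev_eq_self_of_pairwise l (fun x => x) h).symm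
  · intro h
    have := PySem.List.sorted_pairwise_rev (xs := l) (key := fun x => x)
    rwa [← h] at this

-- ===== VERDICT (by name: the statement is the Claim_ definition above) =====
theorem only_spec : Claim_equal_only := by
  intro l _
  show only l = only_alt l
  unfold only only_alt
  simp only []
  have hA := foldA_eq_pairs l (true, true)
  simp only [stepA] at hA
  rw [hA, foldl_stepA]
  simp only [Bool.true_and]
  refine Prod.ext ?_ ?_
  · simp only []
    rw [Bool.eq_iff_iff, pairs_all_ge_iff_sorted_rev_eq, decide_eq_true_eq]
  · simp only []
    rw [Bool.eq_iff_iff, pairs_all_le_iff_sorted_eq, decide_eq_true_eq]
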